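-- pv_equiv track=rewrite | github.com/big-oofff/school-projects | dict.py | word_multiple
-- ===== SOURCE A (Python) =====
-- def word_multiple(array):
--     d = {}
--     result = {}
--     for word in array:
--         if word in d:
--             d[word] += 1
--         else:
--             d[word] = 1
--     for word, count in d.items():
--         result[word] = count >= 2
--     return result
-- ===== SOURCE B (Python) =====
-- def word_multiple(array):
--     seen = set()
--     result = {}
--     for word in array:
--         if word in seen:
--             result[word] = True
--         else:
--             seen.add(word)
--             result[word] = False
--     return result
-- ===== Notes on version B (the rewrite author's own statement) =====
-- stated objective: simpler
-- what changed: Replaces A's two-phase scheme (build an integer count dict, then a second loop deriving the booleans) with a single pass that maintains a seen-set and writes the booleans directly, overwriting False with True on a repeat.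
import Mathlib
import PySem

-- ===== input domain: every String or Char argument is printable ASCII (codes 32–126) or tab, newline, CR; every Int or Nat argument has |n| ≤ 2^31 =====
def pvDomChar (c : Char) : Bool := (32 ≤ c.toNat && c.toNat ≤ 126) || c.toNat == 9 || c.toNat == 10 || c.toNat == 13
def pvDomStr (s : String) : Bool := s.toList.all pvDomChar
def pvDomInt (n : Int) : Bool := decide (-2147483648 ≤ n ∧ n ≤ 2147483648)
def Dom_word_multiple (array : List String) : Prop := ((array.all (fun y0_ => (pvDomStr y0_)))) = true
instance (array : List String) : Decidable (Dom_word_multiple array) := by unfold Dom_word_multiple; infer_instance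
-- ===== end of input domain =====

-- B fuses A's count-then-derive two loops into one pass with a seen-set and direct boolean writes (objective: simpler).


-- ===== PORT A =====
-- first loop: count occurrences into d; second loop: derive result[word] = count >= 2
def word_multiple (array : List String) : List (String × Bool) :=
  let d : PySem.Dict String Int :=
    array.foldl (fun d word =>
      if d.contains word then d.modify word 0 (· + 1) else d.insert word 1)
      PySem.Dict.empty
  let result : PySem.Dict String Bool :=
    d.items.foldl (fun r p => r.insert p.1 (decide (p.2 ≥ 2))) PySem.Dict.empty
  result.items

-- ===== PORT B =====
-- single pass: seen-set plus direct boolean writes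
def word_multiple_alt (array : List String) : List (String × Bool) :=
  (array.foldl (fun (st : PySem.Set String × PySem.Dict String Bool) word =>
      if PySem.Set.contains st.1 word then (st.1, st.2.insert word true)
      else (PySem.Set.add st.1 word, st.2.insert word false))
    (PySem.Set.empty, PySem.Dict.empty)).2.items

-- ===== PRECONDITION & SPEC =====
def Spec_word_multiple (array : List String) (out : List (String × Bool)) : Prop := out = word_multiple_alt array
instance (array : List String) (out : List (String × Bool)) : Decidable (Spec_word_multiple array out) := by unfold Spec_word_multiple; infer_instance

-- ===== CLAIM (what is proved, stated in full; the proofs are below) =====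
def Claim_equal_word_multiple : Prop := ∀ (array : List String), Dom_word_multiple array → Spec_word_multiple array (word_multiple array)

-- ===== LEMMAS AND PROOFS =====

-- A's counting branch is exactly Counter's step
lemma wm_branch_eq_modify (d : PySem.Dict String Int) (w : String) :
    (if d.contains w then d.modify w 0 (· + 1) else d.insert w 1) = d.modify w 0 (· + 1) := by
  by_cases h : d.contains w = true
  · simp [h]
  · simp only [Bool.not_eq_true] at h
    simp [h, PySem.Dict.modify, PySem.Dict.getD_of_not_contains d 0 h]

-- A's result, in closed form
lemma wm_A_closed (array : List String) :
    word_multiple array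
      = (PySem.Set.ofList array).map (fun k => (k, decide ((array.count k : Int) ≥ 2))) := by
  unfold word_multiple
  have hd : array.foldl (fun d word =>
      if d.contains word then d.modify word 0 (· + 1) else d.insert word 1)
      (PySem.Dict.empty : PySem.Dict String Int) = PySem.Dict.counter array := by
    rw [PySem.Dict.counter_eq_foldl]
    exact PySem.List.foldl_congr_mem array _ _ _ (fun d w _ => wm_branch_eq_modify d w)
  simp only [hd]
  rw [PySem.Dict.items_foldl_insert_fresh (PySem.Dict.counter array).items
      (fun p => p.1) (fun p => decide (p.2 ≥ 2)) PySem.Dict.empty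
      (fun p _ => PySem.Dict.contains_empty _)
      (by simpa [PySem.Dict.keys] using PySem.Dict.nodup_keys_counter array)]
  simp [PySem.Dict.items_counter, List.map_map, Function.comp_def, PySem.Dict.empty]

-- B's loop invariant: after any prefix, the result dict lists the distinct words seen,
-- each mapped to whether its running count reached 2
lemma wm_B_inv (l : List String) : ∀ (s : PySem.Set String) (r : PySem.Dict String Bool)
    (cnt : String → Nat),
    (∀ w, w ∈ s ↔ 0 < cnt w) →
    r.items = s.map (fun k => (k, decide (2 ≤ cnt k))) →
    (l.foldl (fun (st : PySem.Set String × PySem.Dict String Bool) word =>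
        if PySem.Set.contains st.1 word then (st.1, st.2.insert word true)
        else (PySem.Set.add st.1 word, st.2.insert word false)) (s, r)).2.items
      = (PySem.Set.update s l).map (fun k => (k, decide (2 ≤ cnt k + l.count k))) := by
  induction l with
  | nil => intro s r cnt hmem hr; simpa [PySem.Set.update] using hr
  | cons w t ih =>
    intro s r cnt hmem hr
    have hkeys : r.keys = s := by
      simp [PySem.Dict.keys, hr, List.map_map, Function.comp_def]
    have hcont : r.contains w = PySem.Set.contains s w := by
      rw [PySem.Dict.contains_eq_decide_mem_keys, hkeys]
      simp [PySem.Set.contains]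
    by_cases hw : PySem.Set.contains s w = true
    · -- repeat occurrence: overwrite with true
      have hws : w ∈ s := by simpa [PySem.Set.contains] using hw
      have hpos : 0 < cnt w := (hmem w).1 hws
      have hc : r.contains w = true := by rw [hcont]; exact hw
      have hr' : (r.insert w true).items
          = s.map (fun k => (k, decide (2 ≤ (fun k => if k = w then cnt k + 1 else cnt k) k))) := by
        rw [PySem.Dict.items_insert_of_contains r true hc, hr, List.map_map]
        refine List.map_congr_left (fun k _ => ?_)
        by_cases hk : k = w
        · subst hk
          simp only [Function.comp_apply, beq_self_eq_true, if_true,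
            Prod.mk.injEq, true_and]
          have : (2 ≤ cnt k + 1) = True := by simp; omega
          simp [this]
        · simp [Function.comp, hk]
      have hmem' : ∀ k, k ∈ s ↔ 0 < (fun k => if k = w then cnt k + 1 else cnt k) k := by
        intro k
        by_cases hk : k = w
        · subst hk
          show k ∈ s ↔ 0 < if k = k then cnt k + 1 else cnt k
          rw [if_pos rfl]
          exact ⟨fun _ => Nat.succ_pos _, fun _ => hws⟩
        · simpa [hk] using hmem k
      have hstep := ih s (r.insert w true) _ hmem' hr'
      have hadd : PySem.Set.add s w = s := by simp [PySem.Set.add, hws]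
      simp only [List.foldl_cons, hw, if_true, PySem.Set.update] at hstep ⊢
      rw [hstep, hadd]
      refine List.map_congr_left (fun k _ => ?_)
      refine congrArg _ ?_
      rw [decide_eq_decide, List.count_cons]
      by_cases hk : k = w
      · subst hk; simp only [beq_self_eq_true, if_true]; omega
      · simp only [if_neg hk, beq_iff_eq, if_neg (Ne.symm hk)]; omega
    · -- first occurrence: append (w, false)
      have hws : w ∉ s := by simpa [PySem.Set.contains] using hw
      have hz : cnt w = 0 := by
        by_contra h; exact hws ((hmem w).2 (Nat.pos_of_ne_zero h))
      have hc : r.contains w = false := by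
        rw [hcont]; exact Bool.eq_false_iff.mpr hw
      have hadd : PySem.Set.add s w = s ++ [w] := by
        simp [PySem.Set.add, PySem.Set.contains, hws]
      have hr' : (r.insert w false).items
          = (s ++ [w]).map (fun k => (k, decide (2 ≤ (fun k => if k = w then 1 else cnt k) k))) := by
        rw [PySem.Dict.items_insert_of_not_contains r false hc, hr, List.map_append]
        congr 1
        · refine List.map_congr_left (fun k hk => ?_)
          have hne : k ≠ w := fun h => hws (h ▸ hk)
          simp [hne]
        · simp
      have hmem' : ∀ k, k ∈ s ++ [w] ↔ 0 < (fun k => if k = w then 1 else cnt k) k := by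
        intro k
        by_cases hk : k = w
        · subst hk; simp
        · simpa [hk] using hmem k
      have hstep := ih (s ++ [w]) (r.insert w false) _ hmem' hr'
      simp only [List.foldl_cons, hw, if_false, Bool.false_eq_true, PySem.Set.update] at hstep ⊢
      rw [hadd, hstep]
      refine List.map_congr_left (fun k _ => ?_)
      refine congrArg _ ?_
      rw [decide_eq_decide, List.count_cons]
      by_cases hk : k = w
      · subst hk; simp only [beq_self_eq_true, if_true, hz]; omega
      · simp only [if_neg hk, beq_iff_eq, if_neg (Ne.symm hk)]; omega

-- B's result, in closed form
lemma wm_B_closed (array : List String) :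
    word_multiple_alt array
      = (PySem.Set.ofList array).map (fun k => (k, decide (2 ≤ array.count k))) := by
  unfold word_multiple_alt
  rw [wm_B_inv array PySem.Set.empty PySem.Dict.empty (fun _ => 0)
    (fun w => by simp [PySem.Set.empty]) rfl]
  rw [PySem.Set.ofList_eq_foldl]
  simp [PySem.Set.update, PySem.Set.empty]

-- ===== VERDICT (by name: the statement is the Claim_ definition above) =====
theorem word_multiple_spec : Claim_equal_word_multiple := by
  intro array _
  show word_multiple array = word_multiple_alt array
  rw [wm_A_closed, wm_B_closed]
  refine List.map_congr_left (fun k _ => ?_)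
  refine congrArg _ ?_
  rw [decide_eq_decide, ge_iff_le]
  exact_mod_cast Iff.rfl
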